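-- pv_equiv track=rewrite | github.com/rubtsovdmitry/python | level 1/5. Lists and strings/1.5.42.task.py | my_f2
-- ===== SOURCE A (Python) =====
-- def my_f3(uno_list):
--     result_list = []
--     znaki = ["*", "/", "^", "-", "+"]
--     u = ["u-", "u+"]
--     i_temp = ""
--     for i in uno_list:
--         if i not in znaki and i_temp == "":
--             result_list.append(i)
--         elif i in znaki:
--             i_temp = i
--         elif i not in znaki and i_temp != "" and i in u:
--             result_list.append(i)
--         elif i not in znaki and i_temp != "":
--             result_list.append(i)
--             result_list.append(i_temp)
--             i_temp = ""
--     return result_list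
--
-- def my_f2(result_list):
--     uno_list = []
--     znaki = ["*", "/", "^", "-", "+"]
--     znaki_2 = ["-", "+"]
--     temp = ""
--     for index, i in enumerate(result_list):
--         if index == 0 and i in znaki_2:
--             uno_list.append("u" + i)
--             temp = i
--         elif i not in znaki_2:
--             uno_list.append(str(i))
--             temp = i
--         elif i in znaki_2 and temp in znaki:
--             uno_list.append("u" + i)
--             temp = i
--         elif i in znaki_2 and temp not in znaki:
--             uno_list.append(i)
--             temp = i
--     return my_f3(uno_list)
-- ===== SOURCE B (Python) =====
-- def my_f2(result_list):
--     znaki = ["*", "/", "^", "-", "+"]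
--     out = []
--     temp = ""
--     i_temp = ""
--     first = True
--     for i in result_list:
--         # fused pass: compute the intermediate token m, then feed it to the
--         # second state machine directly
--         if i in ("-", "+") and (first or temp in znaki):
--             m = "u" + i
--         else:
--             m = str(i)
--         temp = i
--         first = False
--         if m in znaki:
--             i_temp = m
--         elif i_temp == "" or m in ("u-", "u+"):
--             out.append(m)
--         else:
--             out.append(m)
--             out.append(i_temp)
--             i_temp = ""
--     return out
-- ===== Notes on version B (the rewrite author's own statement) =====
-- stated objective: alternative
-- what changed: B fuses A's two state-machine passes into a single loop over the input, maintaining both machines' states (temp, i_temp) at once and never materializing the intermediate uno_list.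
import Mathlib
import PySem

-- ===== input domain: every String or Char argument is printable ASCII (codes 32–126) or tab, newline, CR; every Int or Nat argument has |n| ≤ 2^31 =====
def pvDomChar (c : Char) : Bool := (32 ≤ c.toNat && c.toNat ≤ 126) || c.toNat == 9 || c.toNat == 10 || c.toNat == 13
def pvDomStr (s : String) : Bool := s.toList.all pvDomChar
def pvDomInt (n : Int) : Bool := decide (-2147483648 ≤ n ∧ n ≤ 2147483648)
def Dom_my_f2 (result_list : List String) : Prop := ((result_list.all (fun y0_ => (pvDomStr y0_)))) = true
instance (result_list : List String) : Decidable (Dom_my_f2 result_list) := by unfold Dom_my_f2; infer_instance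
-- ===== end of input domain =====

-- B fuses A's two passes into one loop over the input; equivalence is proved on all inputs.

-- ===== PORT A =====
def pvZnaki : List String := ["*", "/", "^", "-", "+"]
def pvZnaki2 : List String := ["-", "+"]
def pvU : List String := ["u-", "u+"]

-- the for-loop of my_f3, state = (result_list acc, i_temp)
def f3Loop : List String → String → List String → List String
  | [], _, acc => acc
  | i :: rest, i_temp, acc =>
    if i ∉ pvZnaki ∧ i_temp = "" then f3Loop rest i_temp (acc ++ [i])
    else if i ∈ pvZnaki then f3Loop rest i acc
    else if i ∉ pvZnaki ∧ i_temp ≠ "" ∧ i ∈ pvU then f3Loop rest i_temp (acc ++ [i])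
    else if i ∉ pvZnaki ∧ i_temp ≠ "" then f3Loop rest "" (acc ++ [i, i_temp])
    else f3Loop rest i_temp acc

def my_f3 (uno_list : List String) : List String := f3Loop uno_list "" []

-- the for-loop of my_f2, state = (uno_list acc, index, temp)
def f2Loop : List String → Nat → String → List String → List String
  | [], _, _, acc => acc
  | i :: rest, index, temp, acc =>
    if index = 0 ∧ i ∈ pvZnaki2 then f2Loop rest (index + 1) i (acc ++ ["u" ++ i])
    else if i ∉ pvZnaki2 then f2Loop rest (index + 1) i (acc ++ [i])
    else if i ∈ pvZnaki2 ∧ temp ∈ pvZnaki then f2Loop rest (index + 1) i (acc ++ ["u" ++ i])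
    else if i ∈ pvZnaki2 ∧ temp ∉ pvZnaki then f2Loop rest (index + 1) i (acc ++ [i])
    else f2Loop rest (index + 1) i acc

def my_f2 (result_list : List String) : List String :=
  my_f3 (f2Loop result_list 0 "" [])

-- ===== PORT B =====
def pvOps : List String := ["*", "/", "^", "-", "+"]

-- single fused loop, state = (out acc, first, temp, i_temp)
def bLoop : List String → Bool → String → String → List String → List String
  | [], _, _, _, out => out
  | i :: rest, first, temp, i_temp, out =>
    let m := if (i = "-" ∨ i = "+") ∧ (first ∨ temp ∈ pvOps) then "u" ++ i else i
    if m ∈ pvOps then bLoop rest false i m out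
    else if i_temp = "" ∨ m = "u-" ∨ m = "u+" then bLoop rest false i i_temp (out ++ [m])
    else bLoop rest false i "" (out ++ [m, i_temp])

def my_f2_alt (result_list : List String) : List String :=
  bLoop result_list true "" "" []

-- ===== PRECONDITION & SPEC =====
def Spec_my_f2 (result_list : List String) (out : List String) : Prop := out = my_f2_alt result_list
instance (result_list : List String) (out : List String) : Decidable (Spec_my_f2 result_list out) := by unfold Spec_my_f2; infer_instance

-- ===== CLAIM (what is proved, stated in full; the proofs are below) =====
def Claim_equal_my_f2 : Prop := ∀ (result_list : List String), Dom_my_f2 result_list → Spec_my_f2 result_list (my_f2 result_list)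

-- ===== LEMMAS AND PROOFS =====

theorem f2Loop_acc (l : List String) (idx : Nat) (temp : String) (acc : List String) :
    f2Loop l idx temp acc = acc ++ f2Loop l idx temp [] := by
  induction l generalizing idx temp acc with
  | nil => simp [f2Loop]
  | cons i rest ih =>
    simp only [f2Loop]
    split_ifs <;> (rw [ih]; try (conv_rhs => rw [ih])) <;> simp
set_option maxHeartbeats 1600000 in
theorem main_fused (l : List String) (idx : Nat) (temp i_temp : String) (acc : List String) :
    f3Loop (f2Loop l idx temp []) i_temp acc = bLoop l (idx = 0) temp i_temp acc := by
  induction l generalizing idx temp i_temp acc with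
  | nil => simp [f2Loop, f3Loop, bLoop]
  | cons i rest ih =>
    simp only [f2Loop, bLoop]
    by_cases h2 : i ∈ pvZnaki2
    · have h2' : i = "-" ∨ i = "+" := by simpa [pvZnaki2] using h2
      obtain rfl | rfl := h2' <;>
        split_ifs <;> rw [f2Loop_acc] <;>
        simp only [List.cons_append, List.nil_append, f3Loop] <;>
        (try split_ifs) <;> simp_all [pvZnaki, pvOps, pvZnaki2, pvU]
    · split_ifs <;> rw [f2Loop_acc] <;>
        simp only [List.cons_append, List.nil_append, f3Loop] <;>
        (try split_ifs) <;> simp_all [pvZnaki, pvOps, pvZnaki2, pvU]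

-- ===== VERDICT (by name: the statement is the Claim_ definition above) =====
theorem my_f2_spec : Claim_equal_my_f2 := by
  intro l _
  unfold Spec_my_f2 my_f2 my_f3 my_f2_alt
  have := main_fused l 0 "" "" []
  simpa using this
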